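-- pv_equiv track=rewrite | github.com/BlastWind/leetcode | jp-morgan/one.py | getIdealNums
-- ===== SOURCE A (Python) =====
-- def getIdealNums(low, high):
-- 	res = 0
-- 	i = 1
-- 	while i <= high:
-- 		j = i
-- 		while j <= high:
-- 			if j >= low:
-- 				res += 1
-- 			j *= 5
-- 		i *= 3
-- 	return res
-- ===== SOURCE B (Python) =====
-- def cnt5(x):
--     # number of powers of 5 (5**k, k >= 0) that are <= x
--     return 0 if x < 1 else 1 + cnt5(x // 5)
--
--
-- def getIdealNums(low, high):
--     # For each power of 3 p3 <= high, count the powers of 5 in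
--     # [ceil(low/p3), high//p3] arithmetically instead of scanning products.
--     res = 0
--     p3 = 1
--     while p3 <= high:
--         res += max(0, cnt5(high // p3) - cnt5((low - 1) // p3))
--         p3 *= 3
--     return res
-- ===== Notes on version B (the rewrite author's own statement) =====
-- stated objective: alternative
-- what changed: Replaces A's inner loop that scans the products j, 5j, 25j, ... against [low, high] by an arithmetic count: for each power of 3 it counts powers of 5 via max(0, cnt5(high // p3) - cnt5((low - 1) // p3)), where cnt5(x) counts powers of 5 <= x by repeated floor division.
import Mathlib
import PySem

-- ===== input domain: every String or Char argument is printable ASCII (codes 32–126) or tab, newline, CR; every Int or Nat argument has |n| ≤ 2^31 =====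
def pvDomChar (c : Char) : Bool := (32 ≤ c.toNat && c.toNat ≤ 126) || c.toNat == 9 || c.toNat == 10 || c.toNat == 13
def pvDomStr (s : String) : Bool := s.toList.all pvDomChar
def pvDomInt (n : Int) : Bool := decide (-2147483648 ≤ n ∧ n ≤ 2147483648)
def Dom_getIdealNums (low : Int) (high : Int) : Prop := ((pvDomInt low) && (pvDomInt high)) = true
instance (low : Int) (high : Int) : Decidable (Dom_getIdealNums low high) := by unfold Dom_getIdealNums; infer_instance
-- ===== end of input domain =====

-- B replaces A's inner scan over products j, 5*j, 25*j, … by an arithmetic count of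
-- the powers of 5 lying in [ceil(low/p3), high // p3]; alternative algorithm, same cost.

-- ===== PORT A =====
-- inner 'while j <= high: if j >= low: res += 1; j *= 5'
def pvLoopJ (low high : Int) (j res : Int) (hj : 1 ≤ j) : Int :=
  if _h : j ≤ high then
    pvLoopJ low high (j * 5) (if j ≥ low then res + 1 else res) (by omega)
  else res
termination_by (high + 1 - j).toNat
decreasing_by omega

-- outer 'while i <= high: <inner loop>; i *= 3'
def pvLoopI (low high : Int) (i res : Int) (hi : 1 ≤ i) : Int :=
  if _h : i ≤ high then
    pvLoopI low high (i * 3) (pvLoopJ low high i res hi) (by omega)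
  else res
termination_by (high + 1 - i).toNat
decreasing_by omega

def getIdealNums (low : Int) (high : Int) : Int := pvLoopI low high 1 0 (by omega)

-- ===== PORT B =====
-- cnt5(x) = number of powers of 5 (5^k, k ≥ 0) that are ≤ x
def pvCnt5 (x : Int) : Int :=
  if _h : 1 ≤ x then 1 + pvCnt5 (PySem.Int.floordiv x 5) else 0
termination_by x.toNat
decreasing_by
  rw [PySem.Int.floordiv_eq_ediv_of_pos (by omega : (0:Int) < 5)]
  omega

-- 'while p3 <= high: res += max(0, cnt5(high // p3) - cnt5((low - 1) // p3)); p3 *= 3'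
def pvAltLoop (low high : Int) (p3 res : Int) (hp : 1 ≤ p3) : Int :=
  if _h : p3 ≤ high then
    pvAltLoop low high (p3 * 3)
      (res + max 0 (pvCnt5 (PySem.Int.floordiv high p3) - pvCnt5 (PySem.Int.floordiv (low - 1) p3)))
      (by omega)
  else res
termination_by (high + 1 - p3).toNat
decreasing_by omega

def getIdealNums_alt (low : Int) (high : Int) : Int := pvAltLoop low high 1 0 (by omega)

-- ===== PRECONDITION & SPEC =====
def Spec_getIdealNums (low : Int) (high : Int) (out : Int) : Prop := out = getIdealNums_alt low high
instance (low : Int) (high : Int) (out : Int) : Decidable (Spec_getIdealNums low high out) := by unfold Spec_getIdealNums; infer_instance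

-- ===== CLAIM (what is proved, stated in full; the proofs are below) =====
def Claim_equal_getIdealNums : Prop := ∀ (low : Int) (high : Int), Dom_getIdealNums low high → Spec_getIdealNums low high (getIdealNums low high)

-- ===== LEMMAS AND PROOFS =====

lemma pvCnt5_step (x : Int) (h : 1 ≤ x) : pvCnt5 x = 1 + pvCnt5 (PySem.Int.floordiv x 5) := by
  conv_lhs => rw [pvCnt5]
  rw [dif_pos h]

lemma pvCnt5_of_lt_one {x : Int} (h : x < 1) : pvCnt5 x = 0 := by
  conv_lhs => rw [pvCnt5]
  rw [dif_neg (show ¬ (1 ≤ x) by omega)]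

lemma pvCnt5_nonneg (x : Int) : 0 ≤ pvCnt5 x := by
  fun_induction pvCnt5 x with
  | case1 x h ih => omega
  | case2 x h => omega

lemma floordiv_floordiv5 (a b : Int) (hb : 0 < b) :
    PySem.Int.floordiv (PySem.Int.floordiv a b) 5 = PySem.Int.floordiv a (b * 5) := by
  rw [PySem.Int.floordiv_eq_ediv_of_pos hb,
      PySem.Int.floordiv_eq_ediv_of_pos (by omega : (0:Int) < 5),
      PySem.Int.floordiv_eq_ediv_of_pos (by omega : (0:Int) < b * 5)]
  exact Int.ediv_ediv_of_nonneg (by omega)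

-- the inner product scan counts exactly the powers of 5 between the division bounds
lemma pvLoopJ_eq (low high j res : Int) (hj : 1 ≤ j) :
    pvLoopJ low high j res hj =
      res + max 0 (pvCnt5 (PySem.Int.floordiv high j) - pvCnt5 (PySem.Int.floordiv (low - 1) j)) := by
  fun_induction pvLoopJ low high j res hj with
  | case1 j res hj h ih =>
      have hH : pvCnt5 (PySem.Int.floordiv high j)
          = 1 + pvCnt5 (PySem.Int.floordiv high (j * 5)) := by
        rw [pvCnt5_step _ ((PySem.Int.le_floordiv_iff_mul_le (by omega)).mpr (by omega)),
          floordiv_floordiv5 _ _ (by omega)]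
      have h5h := pvCnt5_nonneg (PySem.Int.floordiv high (j * 5))
      by_cases hlj : j ≥ low
      · have hl : pvCnt5 (PySem.Int.floordiv (low - 1) j) = 0 :=
          pvCnt5_of_lt_one ((PySem.Int.floordiv_lt_iff_lt_mul (by omega)).mpr (by omega))
        have hl5 : pvCnt5 (PySem.Int.floordiv (low - 1) (j * 5)) = 0 :=
          pvCnt5_of_lt_one ((PySem.Int.floordiv_lt_iff_lt_mul (by omega)).mpr (by omega))
        rw [if_pos hlj]
        rw [dif_pos hlj] at ih
        rw [ih, hH, hl, hl5, sub_zero, sub_zero, max_eq_right h5h,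
          max_eq_right (show (0:Int) ≤ 1 + pvCnt5 (PySem.Int.floordiv high (j * 5)) by omega)]
        ring
      · have hL : pvCnt5 (PySem.Int.floordiv (low - 1) j)
            = 1 + pvCnt5 (PySem.Int.floordiv (low - 1) (j * 5)) := by
          rw [pvCnt5_step _ ((PySem.Int.le_floordiv_iff_mul_le (by omega)).mpr (by omega)),
            floordiv_floordiv5 _ _ (by omega)]
        rw [if_neg hlj]
        rw [dif_neg hlj] at ih
        rw [ih, hH, hL,
          show (1:Int) + pvCnt5 (PySem.Int.floordiv high (j * 5))
              - (1 + pvCnt5 (PySem.Int.floordiv (low - 1) (j * 5)))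
            = pvCnt5 (PySem.Int.floordiv high (j * 5))
              - pvCnt5 (PySem.Int.floordiv (low - 1) (j * 5)) from by ring]
  | case2 j res hj h =>
      have hH : pvCnt5 (PySem.Int.floordiv high j) = 0 :=
        pvCnt5_of_lt_one ((PySem.Int.floordiv_lt_iff_lt_mul (by omega)).mpr (by omega))
      have hL := pvCnt5_nonneg (PySem.Int.floordiv (low - 1) j)
      rw [hH, zero_sub, max_eq_left (by omega : -pvCnt5 (PySem.Int.floordiv (low - 1) j) ≤ 0)]
      ring

lemma pvLoopI_eq (low high : Int) (i res : Int) (hi : 1 ≤ i) :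
    pvLoopI low high i res hi = pvAltLoop low high i res hi := by
  fun_induction pvLoopI low high i res hi with
  | case1 i res hi h ih =>
      rw [ih, pvLoopJ_eq]
      conv_rhs => rw [pvAltLoop]
      simp [h]
  | case2 i res hi h =>
      rw [pvAltLoop]
      simp [h]

-- ===== VERDICT (by name: the statement is the Claim_ definition above) =====
theorem getIdealNums_spec : Claim_equal_getIdealNums := by
  intro low high _
  unfold Spec_getIdealNums getIdealNums getIdealNums_alt
  exact pvLoopI_eq low high 1 0 (by omega)
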